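-- pv_equiv track=rewrite | github.com/Elaine-one/shaanxi-heritage-ai-platform | Agent/services/pdf_generator_optimized.py | _replace_markdown_bold
-- ===== SOURCE A (Python) =====
-- def _replace_markdown_bold(text: str) -> str:
--     """替换 **text** 为 <b>text</b>"""
--     result = []
--     i = 0
--     while i < len(text):
--         if text[i:i+2] == '**':
--             end = text.find('**', i + 2)
--             if end != -1:
--                 content = text[i+2:end]
--                 result.append(f'<b>{content}</b>')
--                 i = end + 2
--                 continue
--         result.append(text[i])
--         i += 1
--     return ''.join(result)
-- ===== SOURCE B (Python) =====
-- def _replace_markdown_bold(text: str) -> str: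
--     """替换 **text** 为 <b>text</b> — split on '**' and wrap the odd parts."""
--     parts = text.split('**')
--     pieces = []
--     for k, p in enumerate(parts):
--         if k % 2 == 0:
--             pieces.append(p)
--         elif k == len(parts) - 1:
--             pieces.append('**' + p)
--         else:
--             pieces.append('<b>' + p + '</b>')
--     return ''.join(pieces)
-- ===== Notes on version B (the rewrite author's own statement) =====
-- stated objective: faster
-- what changed: Replaced the manual per-character index-scanning while-loop (slice test plus find for each marker) with one C-level str.split on the marker followed by wrapping the odd-indexed parts in <b>..</b>, the last part kept literal when its opening marker is unmatched.
import Mathlib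
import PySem

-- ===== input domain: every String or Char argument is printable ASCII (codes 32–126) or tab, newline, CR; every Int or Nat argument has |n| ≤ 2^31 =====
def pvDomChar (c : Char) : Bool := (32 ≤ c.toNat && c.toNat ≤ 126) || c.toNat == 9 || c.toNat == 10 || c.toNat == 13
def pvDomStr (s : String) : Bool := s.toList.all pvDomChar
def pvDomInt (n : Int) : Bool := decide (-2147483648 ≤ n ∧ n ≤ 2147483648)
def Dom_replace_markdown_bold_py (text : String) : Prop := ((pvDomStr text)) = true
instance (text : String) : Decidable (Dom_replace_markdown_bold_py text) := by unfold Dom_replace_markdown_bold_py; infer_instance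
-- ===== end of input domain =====

-- B replaces A's per-character index-scanning while-loop by one split on the marker plus wrapping the odd parts (measured faster in a timing run).

-- ===== PORT A =====
-- termination helper cited by the port: a 2-character slice equal to '**' implies i+2 ≤ len
theorem pvSliceTwoLen {cs : List Char} {i : Nat}
    (hs : PySem.List.slice cs (some (i:Int)) (some ((i:Int)+2)) = (['*','*'] : List Char)) :
    i + 2 ≤ cs.length := by
  have h2 : ((i:Int)+2) = (((i+2:Nat)):Int) := by push_cast; ring
  rw [h2, PySem.List.slice_natCast] at hs
  have h := congrArg List.length hs
  simp at h
  omega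

-- A's while-loop over the running index i
def replaceBoldLoop (cs : List Char) (i : Nat) : List Char :=
  if hi : i < cs.length then
    if hs : PySem.List.slice cs (some (i:Int)) (some ((i:Int)+2)) = (['*','*'] : List Char) then
      if he : PySem.Chars.findFrom cs ['*','*'] ((i:Int)+2) ≠ -1 then
        ['<','b','>'] ++ PySem.List.slice cs (some ((i:Int)+2)) (some (PySem.Chars.findFrom cs ['*','*'] ((i:Int)+2))) ++ ['<','/','b','>']
          ++ replaceBoldLoop cs ((PySem.Chars.findFrom cs ['*','*'] ((i:Int)+2)).toNat + 2)
      else cs[i] :: replaceBoldLoop cs (i+1)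
    else cs[i] :: replaceBoldLoop cs (i+1)
  else []
termination_by cs.length - i
decreasing_by
  · have hk := pvSliceTwoLen hs
    have h2 : ((i:Int)+2) = (((i+2:Nat)):Int) := by push_cast; ring
    rw [h2] at he ⊢
    have hsp := (PySem.Chars.findFrom_natCast_spec cs ['*','*'] (i+2) hk he).1
    omega
  · omega
  · omega

def replace_markdown_bold_py (text : String) : String :=
  String.ofList (replaceBoldLoop text.toList 0)

-- ===== PORT B =====
-- one step of Source B's loop body (k odd and last part ⇒ unmatched opening marker)
def boldJoinStep (L : Int) (acc : List Char) (kp : Int × List Char) : List Char :=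
  if PySem.Int.mod kp.1 2 = 0 then acc ++ kp.2
  else if kp.1 = L - 1 then acc ++ ['*','*'] ++ kp.2
  else acc ++ ['<','b','>'] ++ kp.2 ++ ['<','/','b','>']

def replace_markdown_bold_py_alt (text : String) : String :=
  String.ofList ((PySem.List.enumerate (PySem.Chars.splitOn text.toList ['*','*']) 0).foldl
    (boldJoinStep ((PySem.Chars.splitOn text.toList ['*','*']).length : Int)) [])

-- ===== PRECONDITION & SPEC =====
def Spec_replace_markdown_bold_py (text : String) (out : String) : Prop := out = replace_markdown_bold_py_alt text
instance (text : String) (out : String) : Decidable (Spec_replace_markdown_bold_py text out) := by unfold Spec_replace_markdown_bold_py; infer_instance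

-- ===== CLAIM (what is proved, stated in full; the proofs are below) =====
def Claim_equal_replace_markdown_bold_py : Prop := ∀ (text : String), Dom_replace_markdown_bold_py text → Spec_replace_markdown_bold_py text (replace_markdown_bold_py text)

-- ===== LEMMAS AND PROOFS =====

-- the first-occurrence splitter: the clean recursive form of s.split('**')
def splitR (s : List Char) : List (List Char) :=
  if PySem.Chars.find s ['*','*'] = -1 then [s]
  else s.take (PySem.Chars.find s ['*','*']).toNat ::
       splitR (s.drop ((PySem.Chars.find s ['*','*']).toNat + 2))
termination_by s.length
decreasing_by
  rename_i h
  have hinf : (['*','*'] : List Char) <:+: s := by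
    by_contra hc; exact h ((PySem.Chars.find_eq_neg_one_iff s ['*','*']).mpr hc)
  have hlen : 2 ≤ s.length := by simpa using hinf.length_le
  simp only [List.length_drop]; omega

def consHead (x : List Char) : List (List Char) → List (List Char)
  | [] => [x]
  | p :: ps => (x ++ p) :: ps

def rebuild : Bool → List (List Char) → List Char
  | _, [] => []
  | false, p :: ps => p ++ rebuild true ps
  | true, p :: ps => (if ps.isEmpty then '*' :: '*' :: p else ['<','b','>'] ++ p ++ ['<','/','b','>']) ++ rebuild false ps

theorem splitR_ne_nil (s : List Char) : splitR s ≠ [] := by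
  rw [splitR]; split <;> simp

theorem find_eq_of_first {s : List Char} (n : Nat)
    (hp : (['*','*'] : List Char) <+: s.drop n)
    (hmin : ∀ i < n, ¬ (['*','*'] : List Char) <+: s.drop i) :
    PySem.Chars.find s ['*','*'] = (n : Int) := by
  have hinf : (['*','*'] : List Char) <:+: s :=
    hp.isInfix.trans (List.drop_suffix n s).isInfix
  have h0 : (0:Int) ≤ PySem.Chars.find s ['*','*'] :=
    (PySem.Chars.find_nonneg_iff s ['*','*']).mpr hinf
  obtain ⟨h1, h2⟩ := PySem.Chars.find_spec h0
  have : (PySem.Chars.find s ['*','*']).toNat = n := by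
    rcases Nat.lt_trichotomy (PySem.Chars.find s ['*','*']).toNat n with h | h | h
    · exact absurd h1 (hmin _ h)
    · exact h
    · exact absurd hp (h2 n h)
  omega

theorem find_prefix_zero {s : List Char} (hp : (['*','*'] : List Char) <+: s) :
    PySem.Chars.find s ['*','*'] = 0 := by
  simpa using find_eq_of_first 0 (by simpa using hp) (by omega)

theorem find_cons_neg {c : Char} {u : List Char}
    (hnp : ¬ (['*','*'] : List Char) <+: (c :: u))
    (hf : PySem.Chars.find u ['*','*'] = -1) :
    PySem.Chars.find (c :: u) ['*','*'] = -1 := by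
  rw [PySem.Chars.find_eq_neg_one_iff]
  intro hinf
  rw [List.infix_iff_prefix_suffix] at hinf
  obtain ⟨t, hpt, hts⟩ := hinf
  rcases (List.suffix_cons_iff).mp hts with h | h
  · exact hnp (h ▸ hpt)
  · exact (PySem.Chars.find_eq_neg_one_iff u ['*','*']).mp hf (hpt.isInfix.trans h.isInfix)

theorem find_cons_succ {c : Char} {u : List Char}
    (hnp : ¬ (['*','*'] : List Char) <+: (c :: u))
    (hf : (0:Int) ≤ PySem.Chars.find u ['*','*']) :
    PySem.Chars.find (c :: u) ['*','*'] = 1 + PySem.Chars.find u ['*','*'] := by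
  obtain ⟨h1, h2⟩ := PySem.Chars.find_spec hf
  have := find_eq_of_first (s := c :: u) ((PySem.Chars.find u ['*','*']).toNat + 1)
    (by simpa using h1)
    (by
      intro i hi
      cases i with
      | zero => simpa using hnp
      | succ j =>
        have hj : j < (PySem.Chars.find u ['*','*']).toNat := by omega
        simpa using h2 j hj)
  rw [this]; omega

theorem splitR_no {s : List Char} (h : ¬ (['*','*'] : List Char) <:+: s) :
    splitR s = [s] := by
  rw [splitR, if_pos ((PySem.Chars.find_eq_neg_one_iff s ['*','*']).mpr h)]

theorem splitR_pre {s : List Char} (h : (['*','*'] : List Char) <+: s) :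
    splitR s = [] :: splitR (s.drop 2) := by
  rw [splitR]
  rw [find_prefix_zero h]
  simp

theorem splitR_cons {c : Char} {u : List Char}
    (hnp : ¬ (['*','*'] : List Char) <+: (c :: u)) :
    splitR (c :: u) = consHead [c] (splitR u) := by
  by_cases hf : PySem.Chars.find u ['*','*'] = -1
  · rw [splitR, if_pos (find_cons_neg hnp hf), splitR, if_pos hf]
    simp [consHead]
  · have h0 : (0:Int) ≤ PySem.Chars.find u ['*','*'] := by
      have := PySem.Chars.neg_one_le_find u ['*','*']; omega
    have hcs := find_cons_succ hnp h0
    have hu : splitR u = u.take (PySem.Chars.find u ['*','*']).toNat ::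
        splitR (u.drop ((PySem.Chars.find u ['*','*']).toNat + 2)) := by
      conv_lhs => rw [splitR]
      rw [if_neg hf]
    rw [hu]
    conv_lhs => rw [splitR]
    rw [if_neg (by rw [hcs]; omega), hcs]
    have ht : (1 + PySem.Chars.find u ['*','*']).toNat = (PySem.Chars.find u ['*','*']).toNat + 1 := by omega
    rw [ht, show (PySem.Chars.find u ['*','*']).toNat + 1 + 2
        = ((PySem.Chars.find u ['*','*']).toNat + 2) + 1 from by omega]
    simp [consHead]

theorem consHead_nil {xs : List (List Char)} (h : xs ≠ []) : consHead [] xs = xs := by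
  cases xs with
  | nil => exact absurd rfl h
  | cons p ps => simp [consHead]

theorem consHead_consHead (x : List Char) (c : Char) (xs : List (List Char)) :
    consHead x (consHead [c] xs) = consHead (x ++ [c]) xs := by
  cases xs <;> simp [consHead]

theorem rebuild_consHead {c : Char} {xs : List (List Char)} (h : xs ≠ []) :
    rebuild false (consHead [c] xs) = c :: rebuild false xs := by
  cases xs with
  | nil => exact absurd rfl h
  | cons p ps => simp [consHead, rebuild]

theorem take_two_shape {xs : List Char} {a b : Char} (h : xs.take 2 = [a, b]) :
    xs = a :: b :: xs.drop 2 := by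
  match xs with
  | [] => simp at h
  | [x] => simp at h
  | x :: y :: r =>
    simp at h
    obtain ⟨h1, h2⟩ := h
    subst h1; subst h2
    rfl

-- a '*'-headed string whose tail has no marker rebuilds to itself
theorem rebuild_star_no {t : List Char} (h : ¬ (['*','*'] : List Char) <:+: t) :
    rebuild false (splitR ('*' :: t)) = '*' :: t := by
  by_cases hp : (['*','*'] : List Char) <+: ('*' :: t)
  · obtain ⟨r, hr⟩ := hp
    simp at hr
    rw [splitR_pre (show (['*','*'] : List Char) <+: ('*' :: t) from ⟨r, by rw [← hr]; rfl⟩)]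
    have hnr : ¬ (['*','*'] : List Char) <:+: r := by
      intro hinf
      exact h (hinf.trans (by rw [← hr]; exact (List.suffix_cons '*' r).isInfix))
    rw [show ('*' :: t).drop 2 = r by rw [← hr]; rfl]
    rw [splitR_no hnr]
    simp [rebuild, ← hr]
  · rw [splitR_cons hp, splitR_no h]
    simp [consHead, rebuild]

-- A's loop computes rebuild ∘ splitR of the remaining suffix
theorem loop_eq (cs : List Char) (i : Nat) :
    replaceBoldLoop cs i = rebuild false (splitR (cs.drop i)) := by
  rw [replaceBoldLoop]
  split
  · rename_i hi
    split
    · rename_i hs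
      have hk := pvSliceTwoLen hs
      have h2 : ((i:Int)+2) = (((i+2:Nat)):Int) := by push_cast; ring
      have hs' : (cs.drop i).take 2 = ['*','*'] := by
        rw [h2, PySem.List.slice_natCast] at hs
        simpa [show i+2-i = 2 by omega] using hs
      have hdi : cs.drop i = '*' :: '*' :: cs.drop (i+2) := by
        have := take_two_shape hs'
        rwa [List.drop_drop] at this
      split
      · rename_i he
        rw [h2] at he ⊢
        rw [PySem.Chars.findFrom_natCast cs ['*','*'] (i+2) hk] at he ⊢
        by_cases hf : PySem.Chars.find (cs.drop (i+2)) ['*','*'] = -1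
        · simp [hf] at he
        · simp only [hf, ite_false]
          have h0 : (0:Int) ≤ PySem.Chars.find (cs.drop (i+2)) ['*','*'] := by
            have := PySem.Chars.neg_one_le_find (cs.drop (i+2)) ['*','*']; omega
          set j := (PySem.Chars.find (cs.drop (i+2)) ['*','*']).toNat with hj
          have hsl : PySem.List.slice cs (some ((i+2:Nat):Int))
              (some (((i+2:Nat):Int) + PySem.Chars.find (cs.drop (i+2)) ['*','*'])) =
              (cs.drop (i+2)).take j := by
            rw [PySem.List.slice_toNat cs (by positivity) (by omega)]
            congr 1
            omega
          rw [hsl]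
          have harg : ((((i+2:Nat)):Int) + PySem.Chars.find (cs.drop (i+2)) ['*','*']).toNat + 2
              = i + 2 + (j + 2) := by omega
          rw [harg, loop_eq cs (i + 2 + (j + 2))]
          have hdrop : cs.drop (i + 2 + (j + 2)) = (cs.drop (i+2)).drop (j+2) := by
            rw [List.drop_drop]
          rw [hdrop, hdi, splitR_pre (show (['*','*'] : List Char) <+: ('*' :: '*' :: cs.drop (i+2)) from ⟨cs.drop (i+2), rfl⟩)]
          simp only [List.drop_succ_cons, List.drop_zero]
          rw [show splitR (cs.drop (i+2))
              = (cs.drop (i+2)).take j :: splitR ((cs.drop (i+2)).drop (j+2)) from by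
            conv_lhs => rw [splitR]
            rw [if_neg hf, ← hj]]
          have hne := splitR_ne_nil ((cs.drop (i+2)).drop (j+2))
          rw [← hdrop] at hne
          simp [rebuild, List.isEmpty_iff, hne]
      · rename_i he
        rw [h2] at he
        rw [PySem.Chars.findFrom_natCast cs ['*','*'] (i+2) hk] at he
        have hf : PySem.Chars.find (cs.drop (i+2)) ['*','*'] = -1 := by
          by_contra hc
          have h0 : (0:Int) ≤ PySem.Chars.find (cs.drop (i+2)) ['*','*'] := by
            have := PySem.Chars.neg_one_le_find (cs.drop (i+2)) ['*','*']; omega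
          simp only [hc, ite_false, ne_eq, not_not] at he
          omega
        have hnf : ¬ (['*','*'] : List Char) <:+: cs.drop (i+2) :=
          (PySem.Chars.find_eq_neg_one_iff _ _).mp hf
        have hdc := List.drop_eq_getElem_cons (l := cs) (i := i) (by omega)
        have hhead : cs[i] = '*' ∧ cs.drop (i+1) = '*' :: cs.drop (i+2) := by
          have hdi2 := hdi
          rw [hdc, List.cons_eq_cons] at hdi2
          exact ⟨hdi2.1, hdi2.2⟩
        rw [loop_eq cs (i+1), hhead.2, rebuild_star_no hnf, hhead.1]
        rw [hdi, splitR_pre (show (['*','*'] : List Char) <+: ('*' :: '*' :: cs.drop (i+2)) from ⟨cs.drop (i+2), rfl⟩)]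
        simp only [List.drop_succ_cons, List.drop_zero]
        rw [splitR_no hnf]
        simp [rebuild]
    · rename_i hs
      have h2 : ((i:Int)+2) = (((i+2:Nat)):Int) := by push_cast; ring
      rw [h2, PySem.List.slice_natCast, show i+2-i = 2 by omega] at hs
      have hnp : ¬ (['*','*'] : List Char) <+: cs.drop i := by
        intro ⟨r, hr⟩
        exact hs (by rw [← hr]; rfl)
      have hdc := List.drop_eq_getElem_cons (l := cs) (i := i) (by assumption)
      rw [hdc] at hnp
      rw [loop_eq cs (i+1), hdc, splitR_cons hnp,
        rebuild_consHead (splitR_ne_nil _)]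
  · rename_i hi
    rw [List.drop_eq_nil_of_le (by omega)]
    rw [splitR_no (by simp)]
    simp [rebuild]
termination_by cs.length - i
decreasing_by
  all_goals omega

-- splitOn's fueled scanner computes splitR
theorem go_eq : ∀ (fuel : Nat) (l cur : List Char) (acc : List (List Char)), l.length < fuel →
    PySem.Chars.splitOn.go ['*','*'] fuel l cur acc = acc.reverse ++ consHead cur.reverse (splitR l) := by
  intro fuel
  induction fuel with
  | zero => intro l cur acc h; omega
  | succ f ih =>
    intro l cur acc h
    match l with
    | [] =>
      rw [show PySem.Chars.splitOn.go ['*','*'] (f+1) [] cur acc = (cur.reverse :: acc).reverse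
        from by simp [PySem.Chars.splitOn.go]]
      rw [splitR_no (by simp)]
      simp [consHead]
    | c :: rest =>
      by_cases hp : (['*','*'] : List Char).isPrefixOf (c :: rest)
      · rw [show PySem.Chars.splitOn.go ['*','*'] (f+1) (c :: rest) cur acc
            = PySem.Chars.splitOn.go ['*','*'] f ((c :: rest).drop 2) [] (cur.reverse :: acc)
          from by simp [PySem.Chars.splitOn.go, hp]]
        have hp' : (['*','*'] : List Char) <+: (c :: rest) := by
          simpa using hp
        have hlen : 2 ≤ (c :: rest).length := by simpa using hp'.length_le
        rw [ih _ _ _ (by simp at h ⊢; omega)]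
        rw [splitR_pre hp']
        simp only [List.reverse_nil]
        rw [consHead_nil (splitR_ne_nil _)]
        simp [consHead]
      · rw [show PySem.Chars.splitOn.go ['*','*'] (f+1) (c :: rest) cur acc
            = PySem.Chars.splitOn.go ['*','*'] f rest (c :: cur) acc
          from by simp [PySem.Chars.splitOn.go, hp]]
        rw [ih _ _ _ (by simp at h ⊢; omega)]
        have hp' : ¬ (['*','*'] : List Char) <+: (c :: rest) := by
          simpa using hp
        rw [splitR_cons hp', consHead_consHead]
        simp

theorem splitOn_eq (s : List Char) : PySem.Chars.splitOn s ['*','*'] = splitR s := by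
  rw [show PySem.Chars.splitOn s ['*','*'] = PySem.Chars.splitOn.go ['*','*'] (s.length + 1) s [] []
    from rfl]
  rw [go_eq (s.length + 1) s [] [] (by omega)]
  simpa using consHead_nil (splitR_ne_nil s)

-- B's enumerate-fold computes rebuild (parity of the index)
theorem fold_rebuild (L : Nat) :
    ∀ (ps : List (List Char)) (n : Nat) (acc : List Char), n + ps.length = L →
    (PySem.List.enumerate ps (n:Int)).foldl (boldJoinStep (L:Int)) acc
      = acc ++ rebuild (n % 2 == 1) ps := by
  intro ps
  induction ps with
  | nil => intro n acc _; simp [PySem.List.enumerate, rebuild]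
  | cons p ps ih =>
    intro n acc hL
    rw [PySem.List.enumerate_cons, List.foldl_cons,
      show ((n:Int)+1) = (((n+1:Nat)):Int) by push_cast; ring,
      ih (n+1) _ (by simp at hL ⊢; omega)]
    have hmod : PySem.Int.mod (n:Int) 2 = ((n % 2 : Nat) : Int) := by
      exact_mod_cast PySem.Int.mod_natCast n 2
    simp only [boldJoinStep]
    by_cases hpar : n % 2 = 0
    · have hm0 : PySem.Int.mod (n:Int) 2 = 0 := by rw [hmod, hpar]; rfl
      have hsucc : (n+1) % 2 = 1 := by omega
      rw [if_pos hm0, hsucc, hpar]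
      simp [rebuild, List.append_assoc]
    · have hodd : n % 2 = 1 := by omega
      have hm1 : ¬ PySem.Int.mod (n:Int) 2 = 0 := by rw [hmod, hodd]; simp
      have hsucc : (n+1) % 2 = 0 := by omega
      rw [if_neg hm1, hsucc, hodd]
      by_cases hlast : ps = []
      · have hn : (n:Int) = (L:Int) - 1 := by
          subst hlast; simp at hL; omega
        rw [if_pos hn]
        simp [rebuild, hlast, List.append_assoc]
      · have hn : ¬ (n:Int) = (L:Int) - 1 := by
          have h1 : 1 ≤ ps.length := by
            cases ps with | nil => exact absurd rfl hlast | cons _ _ => simp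
          simp at hL; omega
        rw [if_neg hn]
        simp [rebuild, List.isEmpty_iff, hlast, List.append_assoc]

-- ===== VERDICT (by name: the statement is the Claim_ definition above) =====
theorem replace_markdown_bold_py_spec : Claim_equal_replace_markdown_bold_py := by
  intro text _
  unfold Spec_replace_markdown_bold_py replace_markdown_bold_py replace_markdown_bold_py_alt
  rw [loop_eq text.toList 0, List.drop_zero, splitOn_eq,
    show (0:Int) = ((0:Nat):Int) from rfl,
    fold_rebuild (splitR text.toList).length (splitR text.toList) 0 [] (by simp)]
  simp
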